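-- pv_equiv track=rewrite | github.com/nazanin-199/FLUID_Extension | experiments/runners/topology_ablation.py | _compute_node_depth
-- ===== SOURCE A (Python) =====
-- from typing import Dict, List, Set, Optional
--
-- def _compute_node_depth(node: str, child_to_parents: Dict, max_depth: int = 20) -> int:
--     """Compute depth of a node in hierarchy."""
--     if node not in child_to_parents:
--         return 0
--
--     visited = {node}
--     queue = [(node, 0)]
--     max_depth_found = 0
--
--     while queue:
--         current, depth = queue.pop(0)
--         max_depth_found = max(max_depth_found, depth)
--
--         if depth >= max_depth:
--             continue
--
--         for parent in child_to_parents.get(current, []):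
--             if parent not in visited:
--                 visited.add(parent)
--                 queue.append((parent, depth + 1))
--
--     return max_depth_found
-- ===== SOURCE B (Python) =====
-- def _compute_node_depth(node: str, child_to_parents, max_depth: int = 20) -> int:
--     """Compute depth of a node in hierarchy by reachable-set saturation:
--     repeatedly close the whole ancestor set under one parent step until it
--     stops growing or the depth cap is reached; the round count is the depth."""
--     reach = {node}
--     depth = 0
--     while depth < max_depth:
--         bigger = set(reach)
--         for cur in reach:
--             for parent in child_to_parents.get(cur, []):
--                 bigger.add(parent)
--         if len(bigger) == len(reach):
--             break
--         reach = bigger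
--         depth += 1
--     return depth
-- ===== Notes on version B (the rewrite author's own statement) =====
-- stated objective: alternative
-- what changed: Replaces A's BFS (FIFO queue of (node, depth) pairs with a visited set and per-pop max tracking) by reachable-set saturation: repeatedly close the entire known ancestor set under one parent step (no queue, no frontier, no visited bookkeeping) and count the rounds until the set stops growing or the cap is hit; the round count equals A's capped maximal BFS depth.
import Mathlib
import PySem

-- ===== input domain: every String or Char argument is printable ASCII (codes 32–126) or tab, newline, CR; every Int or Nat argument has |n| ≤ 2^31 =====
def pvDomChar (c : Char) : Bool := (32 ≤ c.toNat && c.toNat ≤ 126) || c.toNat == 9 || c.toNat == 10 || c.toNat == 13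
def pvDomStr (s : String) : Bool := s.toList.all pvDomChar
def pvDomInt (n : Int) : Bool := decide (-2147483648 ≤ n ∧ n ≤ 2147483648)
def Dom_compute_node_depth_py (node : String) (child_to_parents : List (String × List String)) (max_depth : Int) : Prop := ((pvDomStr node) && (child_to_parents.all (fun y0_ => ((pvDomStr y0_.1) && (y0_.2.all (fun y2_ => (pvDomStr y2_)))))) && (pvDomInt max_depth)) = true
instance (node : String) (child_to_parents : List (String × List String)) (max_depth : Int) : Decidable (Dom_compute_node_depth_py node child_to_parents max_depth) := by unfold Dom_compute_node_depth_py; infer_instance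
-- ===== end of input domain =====

-- B replaces A's BFS (queue of (node, depth) pairs + visited set) by reachable-set saturation:
-- close the whole ancestor set under one parent step per round, count the rounds; same value,
-- proved equivalent below.

-- ===== PORT A =====
-- fuel for A's while-loop: one unit per queue pop is amply covered by (number of parent
-- occurrences in the dict) + 1; a totality guard only (proved never to run out).
def pvFuel (d : PySem.Dict String (List String)) : Nat :=
  (d.values.flatten).length + 1

-- body of A's inner `for parent in child_to_parents.get(current, [])` loop, state = (visited, queue)
def pvStepA (dep : Int) (st : PySem.Set String × List (String × Int)) (p : String) :
    PySem.Set String × List (String × Int) :=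
  if PySem.Set.contains st.1 p then st else (PySem.Set.add st.1 p, st.2 ++ [(p, dep + 1)])

-- A's `while queue:` loop
def pvLoopA (d : PySem.Dict String (List String)) (M : Int) :
    Nat → PySem.Set String → List (String × Int) → Int → Int
  | 0, _, _, m => m
  | fuel + 1, V, q, m =>
    match q with
    | [] => m
    | (cur, dep) :: rest =>
      let m' := max m dep
      if M ≤ dep then pvLoopA d M fuel V rest m'
      else
        let st := (PySem.Dict.getD d cur []).foldl (pvStepA dep) (V, rest)
        pvLoopA d M fuel st.1 st.2 m'

def compute_node_depth_py (node : String) (child_to_parents : List (String × List String)) (max_depth : Int) : Int :=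
  let d := PySem.Dict.ofList child_to_parents
  if !(PySem.Dict.contains d node) then 0
  else pvLoopA d max_depth (pvFuel d) (PySem.Set.ofList [node]) [(node, 0)] 0

-- ===== PORT B =====
-- `bigger = set(reach); for cur in reach: for parent in ...get(cur, []): bigger.add(parent)`
def pvGrow (d : PySem.Dict String (List String)) (R : PySem.Set String) : PySem.Set String :=
  R.foldl (fun S cur => (PySem.Dict.getD d cur []).foldl PySem.Set.add S) R

-- B's `while depth < max_depth:` loop; fuel = max_depth.toNat is exact (depth rises by 1 per round)
def pvLoopS (d : PySem.Dict String (List String)) (M : Int) :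
    Nat → PySem.Set String → Int → Int
  | 0, _, dep => dep
  | fuel + 1, R, dep =>
    if dep < M then
      let R' := pvGrow d R
      if R'.length = R.length then dep
      else pvLoopS d M fuel R' (dep + 1)
    else dep

def compute_node_depth_py_alt (node : String) (child_to_parents : List (String × List String)) (max_depth : Int) : Int :=
  let d := PySem.Dict.ofList child_to_parents
  pvLoopS d max_depth max_depth.toNat (PySem.Set.ofList [node]) 0

-- ===== PRECONDITION & SPEC =====
def Spec_compute_node_depth_py (node : String) (child_to_parents : List (String × List String)) (max_depth : Int) (out : Int) : Prop := out = compute_node_depth_py_alt node child_to_parents max_depth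
instance (node : String) (child_to_parents : List (String × List String)) (max_depth : Int) (out : Int) : Decidable (Spec_compute_node_depth_py node child_to_parents max_depth out) := by unfold Spec_compute_node_depth_py; infer_instance

-- ===== CLAIM (what is proved, stated in full; the proofs are below) =====
def Claim_equal_compute_node_depth_py : Prop := ∀ (node : String) (child_to_parents : List (String × List String)) (max_depth : Int), Dom_compute_node_depth_py node child_to_parents max_depth → Spec_compute_node_depth_py node child_to_parents max_depth (compute_node_depth_py node child_to_parents max_depth)

-- ===== LEMMAS AND PROOFS =====

-- level-synchronized intermediate form of A's BFS, used only by the proofs: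
-- body of the per-parent step, state = (visited, newly discovered)
def pvStepB (st : PySem.Set String × List String) (p : String) :
    PySem.Set String × List String :=
  if PySem.Set.contains st.1 p then st else (PySem.Set.add st.1 p, st.2 ++ [p])

-- gathering one whole level from frontier f
def pvGather (d : PySem.Dict String (List String)) (V : PySem.Set String) (f : List String) :
    PySem.Set String × List String :=
  f.foldl (fun st cur => (PySem.Dict.getD d cur []).foldl pvStepB st) (V, [])

-- the level loop
def pvLoopB (d : PySem.Dict String (List String)) (M : Int) :
    Nat → PySem.Set String → List String → Int → Int
  | 0, _, _, dep => dep
  | fuel + 1, V, f, dep =>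
    if M ≤ dep then dep
    else
      let st := pvGather d V f
      if st.2 = [] then dep
      else pvLoopB d M fuel st.1 st.2 (dep + 1)

-- all strings that can ever be added to `visited`
def pvCand (d : PySem.Dict String (List String)) : List String := d.values.flatten

-- number of still-unvisited candidate occurrences: the BFS termination measure
def pvU (d : PySem.Dict String (List String)) (V : PySem.Set String) : Nat :=
  ((pvCand d).filter (fun x => !(PySem.Set.contains V x))).length

-- one level of gathering, in structured (per-frontier-node) form
def pvGatherC (d : PySem.Dict String (List String)) :
    PySem.Set String → List String → PySem.Set String × List String
  | V, [] => (V, [])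
  | V, c :: f =>
    let C := (PySem.Dict.getD d c []).foldl pvStepB (V, [])
    let G := pvGatherC d C.1 f
    (G.1, C.2 ++ G.2)

-- what A's loop computes from a level-structured state (q1 at depth dep, q2 at dep+1)
def pvH (d : PySem.Dict String (List String)) (M : Int) (V : PySem.Set String)
    (q1 q2 : List String) (dep : Int) : Int :=
  if M ≤ dep then dep
  else
    let C := pvGatherC d V q1
    if q2 ++ C.2 = [] then dep
    else pvLoopB d M (pvU d C.1 + 1) C.1 (q2 ++ C.2) (dep + 1)

-- relation between a visited set and its current frontier: the frontier is the most recently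
-- appended suffix of visited, and every OLDER visited node already has all its parents visited
def pvInv (d : PySem.Dict String (List String)) (V : PySem.Set String) (f : List String) : Prop :=
  ∃ pre, V = pre ++ f ∧ ∀ c ∈ pre, ∀ p ∈ PySem.Dict.getD d c [], p ∈ V

lemma pvStepB_mem (st : PySem.Set String × List String) (p : String) (h : p ∈ st.1) :
    pvStepB st p = st := by
  unfold pvStepB
  rw [if_pos ((PySem.Set.contains_iff _ _).mpr h)]

lemma pvStepB_not_mem (st : PySem.Set String × List String) (p : String) (h : p ∉ st.1) :
    pvStepB st p = (PySem.Set.add st.1 p, st.2 ++ [p]) := by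
  unfold pvStepB
  rw [if_neg (fun hc => h ((PySem.Set.contains_iff _ _).mp hc))]

lemma pvStepA_mem (dep : Int) (st : PySem.Set String × List (String × Int)) (p : String)
    (h : p ∈ st.1) : pvStepA dep st p = st := by
  unfold pvStepA
  rw [if_pos ((PySem.Set.contains_iff _ _).mpr h)]

lemma pvStepA_not_mem (dep : Int) (st : PySem.Set String × List (String × Int)) (p : String)
    (h : p ∉ st.1) : pvStepA dep st p = (PySem.Set.add st.1 p, st.2 ++ [(p, dep + 1)]) := by
  unfold pvStepA
  rw [if_neg (fun hc => h ((PySem.Set.contains_iff _ _).mp hc))]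

lemma pvStepB_acc (ps : List String) : ∀ (V : PySem.Set String) (acc : List String),
    ps.foldl pvStepB (V, acc)
      = ((ps.foldl pvStepB (V, [])).1, acc ++ (ps.foldl pvStepB (V, [])).2) := by
  induction ps with
  | nil => intro V acc; simp
  | cons p ps ih =>
    intro V acc
    by_cases h : p ∈ V
    · rw [List.foldl_cons, List.foldl_cons, pvStepB_mem (V, acc) p h, pvStepB_mem (V, []) p h]
      exact ih V acc
    · rw [List.foldl_cons, List.foldl_cons, pvStepB_not_mem (V, acc) p h,
        pvStepB_not_mem (V, []) p h]
      rw [ih (PySem.Set.add V p) (acc ++ [p]), ih (PySem.Set.add V p) ([] ++ [p])]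
      simp

lemma pvStepA_eq (dep : Int) (ps : List String) : ∀ (V : PySem.Set String) (q0 : List (String × Int)),
    ps.foldl (pvStepA dep) (V, q0)
      = ((ps.foldl pvStepB (V, [])).1,
          q0 ++ ((ps.foldl pvStepB (V, [])).2).map (fun p => (p, dep + 1))) := by
  induction ps with
  | nil => intro V q0; simp
  | cons p ps ih =>
    intro V q0
    by_cases h : p ∈ V
    · rw [List.foldl_cons, List.foldl_cons, pvStepA_mem dep (V, q0) p h, pvStepB_mem (V, []) p h]
      exact ih V q0
    · rw [List.foldl_cons, List.foldl_cons, pvStepA_not_mem dep (V, q0) p h,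
        pvStepB_not_mem (V, []) p h]
      rw [ih (PySem.Set.add V p) (q0 ++ [(p, dep + 1)]),
        pvStepB_acc ps (PySem.Set.add V p) ([] ++ [p])]
      simp

lemma pvGather_acc (d : PySem.Dict String (List String)) (f : List String) :
    ∀ (V : PySem.Set String) (acc : List String),
    f.foldl (fun st cur => (PySem.Dict.getD d cur []).foldl pvStepB st) (V, acc)
      = ((pvGatherC d V f).1, acc ++ (pvGatherC d V f).2) := by
  induction f with
  | nil => intro V acc; simp [pvGatherC]
  | cons c f ih =>
    intro V acc
    simp only [List.foldl_cons, pvGatherC]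
    rw [pvStepB_acc, ih]
    simp

lemma pvGather_eq (d : PySem.Dict String (List String)) (V : PySem.Set String) (f : List String) :
    pvGather d V f = pvGatherC d V f := by
  unfold pvGather
  rw [pvGather_acc]
  simp

lemma pvMem_getD_cand (d : PySem.Dict String (List String)) (c p : String)
    (hp : p ∈ PySem.Dict.getD d c []) : p ∈ pvCand d := by
  rcases hget : PySem.Dict.get? d c with _ | v
  · rw [PySem.Dict.getD_of_get?_eq_none d ([] : List String) hget] at hp; cases hp
  · rw [PySem.Dict.getD_of_get?_eq_some d ([] : List String) hget] at hp
    have hv : (c, v) ∈ d.items := PySem.Dict.mem_items_of_get?_eq_some d hget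
    have hvv : v ∈ d.values := by
      simp only [PySem.Dict.values]
      exact List.mem_map.mpr ⟨(c, v), hv, rfl⟩
    exact List.mem_flatten.mpr ⟨v, hvv, hp⟩

lemma pvContains_add (V : PySem.Set String) (p x : String) (hp : p ∉ V) :
    PySem.Set.contains (PySem.Set.add V p) x = (PySem.Set.contains V x || (x == p)) := by
  rw [PySem.Set.add_of_not_mem hp]
  simp [PySem.Set.contains_eq_listContains, beq_eq_decide]

lemma pvFilter_add (V : PySem.Set String) (p : String) (hp : p ∉ V) :
    ∀ l : List String, p ∈ l →
    (l.filter (fun x => !(PySem.Set.contains (PySem.Set.add V p) x))).length + 1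
      ≤ (l.filter (fun x => !(PySem.Set.contains V x))).length := by
  intro l
  induction l with
  | nil => intro h; cases h
  | cons a l ih =>
    intro hpl
    rcases eq_or_ne a p with rfl | hap
    · have hcV : PySem.Set.contains V a = false := by
        rcases h : PySem.Set.contains V a with _ | _
        · rfl
        · exact absurd ((PySem.Set.contains_iff V a).mp h) hp
      have hcA : PySem.Set.contains (PySem.Set.add V a) a = true := by
        rw [pvContains_add V a a hp, hcV]
        simp
      simp only [List.filter_cons, hcA, hcV, Bool.not_true, Bool.not_false, Bool.false_eq_true,
        if_false, if_true, List.length_cons, Nat.add_le_add_iff_right]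
      rw [← List.countP_eq_length_filter, ← List.countP_eq_length_filter]
      refine List.countP_mono_left ?_
      intro x _ hx
      rw [pvContains_add V a x hp] at hx
      simp only [Bool.not_or, Bool.and_eq_true] at hx
      exact hx.1
    · have hbeq : (a == p) = false := beq_false_of_ne hap
      have hpl' : p ∈ l := by
        rcases List.mem_cons.mp hpl with h | h
        · exact absurd h.symm hap
        · exact h
      simp only [List.filter_cons, pvContains_add V p a hp, hbeq, Bool.or_false]
      rcases hca : PySem.Set.contains V a with _ | _
      · simp only [Bool.not_false, if_true, List.length_cons]
        have := ih hpl'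
        omega
      · simp only [Bool.not_true, Bool.false_eq_true, if_false]
        exact ih hpl'

lemma pvCollect_count (d : PySem.Dict String (List String)) (ps : List String) :
    ∀ (V : PySem.Set String), (∀ p ∈ ps, p ∈ pvCand d) →
    pvU d (ps.foldl pvStepB (V, [])).1 + ((ps.foldl pvStepB (V, [])).2).length ≤ pvU d V := by
  induction ps with
  | nil => intro V _; simp [pvU]
  | cons p ps ih =>
    intro V hps
    by_cases h : p ∈ V
    · rw [List.foldl_cons, pvStepB_mem (V, []) p h]
      exact ih V (fun q hq => hps q (List.mem_cons_of_mem _ hq))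
    · rw [List.foldl_cons, pvStepB_not_mem (V, []) p h,
        pvStepB_acc ps (PySem.Set.add V p) ([] ++ [p])]
      have h1 := ih (PySem.Set.add V p) (fun q hq => hps q (List.mem_cons_of_mem _ hq))
      have h2 := pvFilter_add V p h (pvCand d) (hps p List.mem_cons_self)
      simp only [pvU] at h1 h2 ⊢
      simp only [List.nil_append, List.length_append, List.length_cons, List.length_nil]
      omega

lemma pvGatherC_count (d : PySem.Dict String (List String)) (f : List String) :
    ∀ (V : PySem.Set String),
    pvU d (pvGatherC d V f).1 + ((pvGatherC d V f).2).length ≤ pvU d V := by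
  induction f with
  | nil => intro V; simp [pvGatherC]
  | cons c f ih =>
    intro V
    simp only [pvGatherC]
    have h1 := pvCollect_count d (PySem.Dict.getD d c []) V
      (fun p hp => pvMem_getD_cand d c p hp)
    have h2 := ih ((PySem.Dict.getD d c []).foldl pvStepB (V, [])).1
    simp only [List.length_append]
    omega

lemma pvLoopB_fuel (d : PySem.Dict String (List String)) (M : Int) :
    ∀ (f1 : Nat) (f2 : Nat) (V : PySem.Set String) (fr : List String) (dep : Int),
    pvU d V + 1 ≤ f1 → pvU d V + 1 ≤ f2 →
    pvLoopB d M f1 V fr dep = pvLoopB d M f2 V fr dep := by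
  intro f1
  induction f1 with
  | zero => intro f2 V fr dep h1 _; omega
  | succ f1 ih =>
    intro f2 V fr dep h1 h2
    rcases f2 with _ | f2
    · omega
    simp only [pvLoopB]
    by_cases hM : M ≤ dep
    · simp [hM]
    · simp only [hM, if_false]
      rw [pvGather_eq]
      by_cases hnil : (pvGatherC d V fr).2 = []
      · simp [hnil]
      · simp only [hnil, if_false]
        have hcnt := pvGatherC_count d fr V
        have hlen : 0 < ((pvGatherC d V fr).2).length := by
          simpa using List.length_pos_iff.mpr hnil
        exact ih f2 (pvGatherC d V fr).1 (pvGatherC d V fr).2 (dep + 1)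
          (by omega) (by omega)

lemma pvLoopB_eq_H (d : PySem.Dict String (List String)) (M : Int)
    (fb : Nat) (V : PySem.Set String) (fr : List String) (dep : Int)
    (hfb : pvU d V + 1 ≤ fb) :
    pvLoopB d M fb V fr dep = pvH d M V fr [] dep := by
  rcases fb with _ | fb
  · omega
  simp only [pvLoopB, pvH, List.nil_append]
  by_cases hM : M ≤ dep
  · simp [hM]
  · simp only [hM, if_false]
    rw [pvGather_eq]
    by_cases hnil : (pvGatherC d V fr).2 = []
    · simp [hnil]
    · simp only [hnil, if_false]
      have hcnt := pvGatherC_count d fr V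
      have hlen : 0 < ((pvGatherC d V fr).2).length := by
        simpa using List.length_pos_iff.mpr hnil
      exact pvLoopB_fuel d M fb (pvU d (pvGatherC d V fr).1 + 1) (pvGatherC d V fr).1
        (pvGatherC d V fr).2 (dep + 1) (by omega) (by omega)

lemma pvLoopA_nil (d : PySem.Dict String (List String)) (M : Int) (fa : Nat)
    (V : PySem.Set String) (m : Int) : pvLoopA d M fa V [] m = m := by
  cases fa <;> rfl

lemma pvMain (d : PySem.Dict String (List String)) (M : Int) :
    ∀ (n fa : Nat) (V : PySem.Set String) (q1 q2 : List String) (dep m : Int),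
    2 * fa + (if q1 = [] then 1 else 0) ≤ n →
    pvU d V + q1.length + q2.length ≤ fa →
    m ≤ dep →
    (q1 = [] → q2 = [] → m = dep) →
    (dep < M ∨ q2 = []) →
    pvLoopA d M fa V (q1.map (fun c => (c, dep)) ++ q2.map (fun c => (c, dep + 1))) m
      = pvH d M V q1 q2 dep := by
  intro n
  induction n using Nat.strong_induction_on with
  | _ n IH =>
    intro fa V q1 q2 dep m hn hfa hm hme hcap
    rcases q1 with _ | ⟨cur, q1'⟩
    · rcases q2 with _ | ⟨c, q2'⟩
      · rw [show ((([] : List String).map (fun c => (c, dep))) ++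
          (([] : List String).map (fun c => (c, dep + 1)))) = [] from rfl, pvLoopA_nil,
          hme rfl rfl]
        simp [pvH, pvGatherC]
      · have hdM : dep < M := by
          rcases hcap with h | h
          · exact h
          · cases h
        have hstep := IH (2 * fa) (by simp at hn; omega) fa V (c :: q2') [] (dep + 1) m
          (by simp) (by simp at hfa ⊢; omega) (by omega) (by intro h; cases h) (Or.inr rfl)
        simp only [List.map_nil, List.append_nil, List.nil_append] at hstep ⊢
        rw [hstep]
        have hH : pvH d M V [] (c :: q2') dep
            = pvLoopB d M (pvU d V + 1) V (c :: q2') (dep + 1) := by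
          simp [pvH, pvGatherC, not_le.mpr hdM]
        rw [hH, pvLoopB_eq_H d M (pvU d V + 1) V (c :: q2') (dep + 1) (le_refl _)]
    · rcases fa with _ | fa'
      · simp at hfa
      have hmax : max m dep = dep := max_eq_right hm
      simp only [List.map_cons, List.cons_append, pvLoopA, hmax]
      by_cases hM : M ≤ dep
      · have hq2 : q2 = [] := by
          rcases hcap with h | h
          · omega
          · exact h
        subst hq2
        simp only [hM, if_true, List.map_nil, List.append_nil]
        have := IH (2 * fa' + (if q1' = [] then 1 else 0))
          (by split <;> omega) fa' V q1' [] dep dep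
          (le_refl _) (by simp at hfa ⊢; omega) (le_refl _) (fun _ _ => rfl) (Or.inr rfl)
        simp only [List.map_nil, List.append_nil] at this
        rw [this]
        simp [pvH, hM]
      · simp only [hM, if_false]
        rw [pvStepA_eq]
        have hq : (q1'.map (fun c => (c, dep)) ++ q2.map (fun c => (c, dep + 1))) ++
            (((PySem.Dict.getD d cur []).foldl pvStepB (V, [])).2).map (fun p => (p, dep + 1))
            = q1'.map (fun c => (c, dep)) ++
              (q2 ++ ((PySem.Dict.getD d cur []).foldl pvStepB (V, [])).2).map
                (fun c => (c, dep + 1)) := by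
          simp [List.map_append]
        have hcnt := pvCollect_count d (PySem.Dict.getD d cur []) V
          (fun p hp => pvMem_getD_cand d cur p hp)
        have := IH (2 * fa' + (if q1' = [] then 1 else 0)) (by split <;> omega) fa'
          ((PySem.Dict.getD d cur []).foldl pvStepB (V, [])).1 q1'
          (q2 ++ ((PySem.Dict.getD d cur []).foldl pvStepB (V, [])).2) dep dep
          (le_refl _) (by simp at hfa ⊢; omega) (le_refl _)
          (by intro h1 h2; rfl) (Or.inl (not_le.mp hM))
        rw [hq, this]
        simp [pvH, pvGatherC, List.append_assoc]

-- ===== bridge: level loop (pvLoopB) = saturation loop (pvLoopS) =====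

-- first component of a pvStepB-fold is a plain Set.add fold
lemma pvStepB_fst (ps : List String) : ∀ (st : PySem.Set String × List String),
    (ps.foldl pvStepB st).1 = ps.foldl PySem.Set.add st.1 := by
  induction ps with
  | nil => intro st; rfl
  | cons p ps ih =>
    intro st
    by_cases h : p ∈ st.1
    · rw [List.foldl_cons, List.foldl_cons, pvStepB_mem st p h, PySem.Set.add_of_mem h]
      exact ih st
    · rw [List.foldl_cons, List.foldl_cons, pvStepB_not_mem st p h]
      exact ih _

-- the visited set after one level is the old one with the new frontier appended
lemma pvCollect_fst_append (ps : List String) : ∀ (V : PySem.Set String),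
    (ps.foldl pvStepB (V, [])).1 = V ++ (ps.foldl pvStepB (V, [])).2 := by
  induction ps with
  | nil => intro V; simp
  | cons p ps ih =>
    intro V
    by_cases h : p ∈ V
    · rw [List.foldl_cons, pvStepB_mem (V, []) p h]
      exact ih V
    · rw [List.foldl_cons, pvStepB_not_mem (V, []) p h,
        pvStepB_acc ps (PySem.Set.add V p) ([] ++ [p])]
      simp only [List.nil_append]
      rw [ih (PySem.Set.add V p), PySem.Set.add_of_not_mem h]
      simp

lemma pvGatherC_fst_append (d : PySem.Dict String (List String)) (f : List String) :
    ∀ (V : PySem.Set String), (pvGatherC d V f).1 = V ++ (pvGatherC d V f).2 := by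
  induction f with
  | nil => intro V; simp [pvGatherC]
  | cons c f ih =>
    intro V
    simp only [pvGatherC]
    rw [ih, pvCollect_fst_append]
    simp

-- the visited set after one level, as a plain Set.add fold over the frontier
lemma pvGatherC_fst_fold (d : PySem.Dict String (List String)) (f : List String) :
    ∀ (V : PySem.Set String),
    (pvGatherC d V f).1
      = f.foldl (fun S cur => (PySem.Dict.getD d cur []).foldl PySem.Set.add S) V := by
  induction f with
  | nil => intro V; rfl
  | cons c f ih =>
    intro V
    simp only [pvGatherC, List.foldl_cons]
    rw [ih, pvStepB_fst]

-- a Set.add fold over elements already present does nothing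
lemma pvFold_add_of_mem (ps : List String) (S : PySem.Set String) (h : ∀ p ∈ ps, p ∈ S) :
    ps.foldl PySem.Set.add S = S := by
  induction ps with
  | nil => rfl
  | cons p ps ih =>
    rw [List.foldl_cons, PySem.Set.add_of_mem (h p List.mem_cons_self)]
    exact ih (fun q hq => h q (List.mem_cons_of_mem _ hq))

-- folding the grow step over nodes whose parents are all visited does nothing
lemma pvGrow_covered (d : PySem.Dict String (List String)) (pre : List String) :
    ∀ (S : PySem.Set String), (∀ c ∈ pre, ∀ p ∈ PySem.Dict.getD d c [], p ∈ S) →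
    pre.foldl (fun S cur => (PySem.Dict.getD d cur []).foldl PySem.Set.add S) S = S := by
  induction pre with
  | nil => intro S _; rfl
  | cons c pre ih =>
    intro S h
    rw [List.foldl_cons, pvFold_add_of_mem _ _ (h c List.mem_cons_self)]
    exact ih S (fun c' hc' => h c' (List.mem_cons_of_mem _ hc'))

-- under the invariant, growing the whole reachable set = gathering just the frontier
lemma pvGrow_eq_gather (d : PySem.Dict String (List String)) (V : PySem.Set String)
    (f : List String) (h : pvInv d V f) : pvGrow d V = (pvGatherC d V f).1 := by
  obtain ⟨pre, hV, hcov⟩ := h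
  unfold pvGrow
  rw [pvGatherC_fst_fold, hV, List.foldl_append, pvGrow_covered d pre _
    (fun c hc p hp => hV ▸ hcov c hc p hp)]

-- membership is preserved and parents of processed nodes land in the grown set
lemma pvMem_fold_add (ps : List String) (S : PySem.Set String) (x : String) (h : x ∈ S) :
    x ∈ ps.foldl PySem.Set.add S := by
  induction ps generalizing S with
  | nil => exact h
  | cons p ps ih => exact ih _ ((PySem.Set.mem_add _ _ _).mpr (Or.inl h))

lemma pvMem_fold_add_of_mem (ps : List String) (S : PySem.Set String) (x : String)
    (h : x ∈ ps) : x ∈ ps.foldl PySem.Set.add S := by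
  induction ps generalizing S with
  | nil => cases h
  | cons p ps ih =>
    rcases List.mem_cons.mp h with rfl | h'
    · exact pvMem_fold_add ps _ x ((PySem.Set.mem_add _ _ _).mpr (Or.inr rfl))
    · exact ih _ h'

-- membership is preserved by the whole grow fold
lemma pvMem_grow_fold (d : PySem.Dict String (List String)) (f : List String) :
    ∀ (S : PySem.Set String) (x : String), x ∈ S →
    x ∈ f.foldl (fun S cur => (PySem.Dict.getD d cur []).foldl PySem.Set.add S) S := by
  induction f with
  | nil => intro S x h; exact h
  | cons c f ih =>
    intro S x h
    exact ih _ x (pvMem_fold_add _ _ x h)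

-- every parent of a frontier node is in the gathered visited set
lemma pvGatherC_covers (d : PySem.Dict String (List String)) (f : List String) :
    ∀ (V : PySem.Set String) (c : String), c ∈ f →
    ∀ p ∈ PySem.Dict.getD d c [], p ∈ (pvGatherC d V f).1 := by
  induction f with
  | nil => intro V c hc; cases hc
  | cons c0 f ih =>
    intro V c hc p hp
    rcases List.mem_cons.mp hc with rfl | hc'
    · simp only [pvGatherC]
      rw [pvGatherC_fst_fold, pvStepB_fst]
      exact pvMem_grow_fold d f _ p (pvMem_fold_add_of_mem _ _ p hp)
    · simp only [pvGatherC]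
      exact ih _ c hc' p hp

-- the invariant survives one level step
lemma pvInv_step (d : PySem.Dict String (List String)) (V : PySem.Set String)
    (f : List String) (h : pvInv d V f) :
    pvInv d (pvGatherC d V f).1 (pvGatherC d V f).2 := by
  obtain ⟨pre, hV, hcov⟩ := h
  refine ⟨V, pvGatherC_fst_append d f V, ?_⟩
  intro c hc p hp
  rw [pvGatherC_fst_append]
  rw [hV] at hc
  rcases List.mem_append.mp hc with hcpre | hcf
  · exact List.mem_append.mpr (Or.inl (hV ▸ hcov c hcpre p hp))
  · have := pvGatherC_covers d f V c hcf p hp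
    rwa [pvGatherC_fst_append] at this

-- under the invariant and with enough fuel on both sides, the two loops agree
lemma pvLoopS_eq_loopB (d : PySem.Dict String (List String)) (M : Int) :
    ∀ (fs fb : Nat) (V : PySem.Set String) (f : List String) (dep : Int),
    pvInv d V f → pvU d V + 1 ≤ fb → (M - dep).toNat ≤ fs →
    pvLoopS d M fs V dep = pvLoopB d M fb V f dep := by
  intro fs
  induction fs with
  | zero =>
    intro fb V f dep _ hfb hfs
    rcases fb with _ | fb
    · omega
    have hM : M ≤ dep := by omega
    simp [pvLoopS, pvLoopB, hM]
  | succ fs ih =>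
    intro fb V f dep hinv hfb hfs
    rcases fb with _ | fb
    · omega
    simp only [pvLoopS, pvLoopB]
    by_cases hM : M ≤ dep
    · rw [if_neg (not_lt.mpr hM), if_pos hM]
    · rw [if_pos (not_le.mp hM), if_neg hM]
      rw [pvGather_eq, pvGrow_eq_gather d V f hinv]
      have hlen := pvGatherC_fst_append d f V
      by_cases hnil : (pvGatherC d V f).2 = []
      · rw [if_pos hnil]
        rw [if_pos (by rw [hlen, hnil]; simp)]
      · rw [if_neg hnil]
        have hne : ¬ ((pvGatherC d V f).1.length = V.length) := by
          rw [hlen, List.length_append]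
          intro heq
          have hz : ((pvGatherC d V f).2).length = 0 := by omega
          exact hnil (List.length_eq_zero_iff.mp hz)
        rw [if_neg hne]
        have hcnt := pvGatherC_count d f V
        have hpos : 0 < ((pvGatherC d V f).2).length := List.length_pos_iff.mpr hnil
        exact ih fb (pvGatherC d V f).1 (pvGatherC d V f).2 (dep + 1)
          (pvInv_step d V f hinv) (by omega) (by omega)

-- when node has no entry, the grown set is unchanged and B returns 0 immediately
lemma pvLoopS_not_contains (d : PySem.Dict String (List String)) (M : Int) (fs : Nat)
    (node : String) (h : PySem.Dict.contains d node = false) :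
    pvLoopS d M fs (PySem.Set.ofList [node]) 0 = 0 := by
  rcases fs with _ | fs
  · rfl
  simp only [pvLoopS]
  by_cases hM : (0 : Int) < M
  · rw [if_pos hM]
    have hget : PySem.Dict.getD d node ([] : List String) = [] :=
      PySem.Dict.getD_of_not_contains d ([] : List String) h
    have hgrow : pvGrow d (PySem.Set.ofList [node]) = PySem.Set.ofList [node] := by
      unfold pvGrow
      have h1 : (PySem.Set.ofList [node] : List String) = [node] := rfl
      rw [h1, List.foldl_cons, hget]
      rfl
    simp [hgrow]
  · rw [if_neg hM]

-- ===== VERDICT (by name: the statement is the Claim_ definition above) =====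
theorem compute_node_depth_py_spec : Claim_equal_compute_node_depth_py := by
  intro node cp M _dom
  unfold Spec_compute_node_depth_py compute_node_depth_py compute_node_depth_py_alt
  simp only []
  by_cases hc : PySem.Dict.contains (PySem.Dict.ofList cp) node
  · simp only [hc, Bool.not_true, Bool.false_eq_true, if_false]
    have hU : pvU (PySem.Dict.ofList cp) (PySem.Set.ofList [node]) + 1
        ≤ pvFuel (PySem.Dict.ofList cp) := by
      have := List.length_filter_le
        (fun x => !(PySem.Set.contains (PySem.Set.ofList [node]) x))
        (pvCand (PySem.Dict.ofList cp))
      simp only [pvU, pvFuel, pvCand] at *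
      omega
    have hA := pvMain (PySem.Dict.ofList cp) M (2 * pvFuel (PySem.Dict.ofList cp))
      (pvFuel (PySem.Dict.ofList cp)) (PySem.Set.ofList [node]) [node] [] 0 0
      (by simp) (by simpa using hU) (le_refl _) (by intro h; cases h) (Or.inr rfl)
    simp only [List.map_cons, List.map_nil, List.append_nil] at hA
    rw [hA, ← pvLoopB_eq_H _ _ (pvU (PySem.Dict.ofList cp) (PySem.Set.ofList [node]) + 1) _ _ _ (le_refl _)]
    exact (pvLoopS_eq_loopB (PySem.Dict.ofList cp) M M.toNat _ (PySem.Set.ofList [node])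
      [node] 0 ⟨[], rfl, by intro c hc'; cases hc'⟩ (le_refl _) (by omega)).symm
  · simp only [hc, Bool.not_false, if_true]
    rw [pvLoopS_not_contains (PySem.Dict.ofList cp) M M.toNat node
      (Bool.eq_false_iff.mpr hc)]
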